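-- pv_equiv track=rewrite | github.com/antonioschiro/pharmanutra_dashboard | backend/utils.py | sql_to_dict
-- ===== SOURCE A (Python) =====
-- from typing import Iterable
--
-- def sql_to_dict(query_result: list[Iterable], col_names: Iterable[str]) -> dict:
--     """
--     Convert a list of table rows into a dictionary where each key is a column name and the corresponding value is a list of values for that column.
--     Args:
--         query_result (list[Iterable]): A list of rows, where each row is an iterable of column values.
--         col_names (Iterable[str]): An iterable of column names corresponding to the columns in each row.
--     Returns:
--         dict: A dictionary mapping each column name to a list of its values from all rows.
--     Raises:
--         IndexError: If the number of columns in a row does not match the number of column names.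
--     """
--     try:
--         table_dict = {col: None for col in col_names}
--         for index, key in enumerate(table_dict):
--             table_dict[key] = [t[index] for t in query_result]
--         return table_dict
--     except IndexError as e:
--         raise
-- ===== SOURCE B (Python) =====
-- def sql_to_dict(query_result, col_names):
--     table_dict = {col: [] for col in col_names}
--     keys = list(table_dict)
--     for row in query_result:
--         for i, key in enumerate(keys):
--             table_dict[key].append(row[i])
--     return table_dict
-- ===== Notes on version B (the rewrite author's own statement) =====
-- stated objective: alternative
-- what changed: A builds each column with a separate comprehension pass over all rows (column-major, one full scan of query_result per column); B makes a single row-major pass over query_result, distributing each row's values into per-column lists built up incrementally.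
import Mathlib
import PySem

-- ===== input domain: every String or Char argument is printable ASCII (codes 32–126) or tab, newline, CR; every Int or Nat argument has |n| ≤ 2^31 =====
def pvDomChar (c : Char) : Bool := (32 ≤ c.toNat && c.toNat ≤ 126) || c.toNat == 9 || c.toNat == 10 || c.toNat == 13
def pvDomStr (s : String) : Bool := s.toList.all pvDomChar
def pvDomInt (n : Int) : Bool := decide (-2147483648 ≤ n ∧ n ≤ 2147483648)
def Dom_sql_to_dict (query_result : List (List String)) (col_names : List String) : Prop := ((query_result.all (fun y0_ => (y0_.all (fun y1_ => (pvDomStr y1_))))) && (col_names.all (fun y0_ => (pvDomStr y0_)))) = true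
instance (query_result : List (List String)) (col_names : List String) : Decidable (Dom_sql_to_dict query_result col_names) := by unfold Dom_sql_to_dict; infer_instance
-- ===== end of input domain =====

-- B replaces A's column-major layout (one comprehension pass over all rows per column) by a
-- single row-major pass that appends each row's values to the per-column lists (objective: alternative).

-- ===== PORT A =====
-- `[t[index] for t in query_result]`; t[index] is ported as pyGetD with default "":
-- exact under Pre_sql_to_dict, which guarantees index < len(t) (Python raises IndexError otherwise).
def colA (query_result : List (List String)) (i : Int) : List String :=
  query_result.map (fun t => PySem.List.pyGetD t i "")

-- Python's `{col: None for col in col_names}` only establishes the keys; every value is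
-- overwritten in the loop before the return, so the None placeholder is modelled by [].
def sql_to_dict (query_result : List (List String)) (col_names : List String) : List (String × List String) :=
  let table_dict : PySem.Dict String (List String) :=
    col_names.foldl (fun d col => d.insert col []) PySem.Dict.empty
  let table_dict :=
    (PySem.List.enumerate table_dict.keys).foldl
      (fun d p => d.insert p.2 (colA query_result p.1)) table_dict
  table_dict.items

-- ===== PORT B =====
-- row[i] ported as pyGetD with default "", exact under Pre_sql_to_dict (see above).
def sql_to_dict_alt (query_result : List (List String)) (col_names : List String) : List (String × List String) :=
  let table_dict : PySem.Dict String (List String) :=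
    col_names.foldl (fun d col => d.insert col []) PySem.Dict.empty
  let keys := table_dict.keys
  let table_dict :=
    query_result.foldl
      (fun d row =>
        (PySem.List.enumerate keys).foldl
          (fun d p => d.modify p.2 [] (fun v => v ++ [PySem.List.pyGetD row p.1 ""])) d)
      table_dict
  table_dict.items

-- ===== PRECONDITION & SPEC =====
-- Pre_ excludes exactly the inputs where some row is shorter than the number of distinct
-- column names: there Python's A (and B) raises IndexError.
def Pre_sql_to_dict (query_result : List (List String)) (col_names : List String) : Prop :=
  ∀ row ∈ query_result, (PySem.List.dedup col_names).length ≤ row.length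
instance (query_result : List (List String)) (col_names : List String) : Decidable (Pre_sql_to_dict query_result col_names) := by unfold Pre_sql_to_dict; infer_instance

def pvWitness_sql_to_dict : List (List String) × List String :=
  ([["1", "ann"], ["2", "bob"]], ["id", "name"])

def Spec_sql_to_dict (query_result : List (List String)) (col_names : List String) (out : List (String × List String)) : Prop := out = sql_to_dict_alt query_result col_names
instance (query_result : List (List String)) (col_names : List String) (out : List (String × List String)) : Decidable (Spec_sql_to_dict query_result col_names out) := by unfold Spec_sql_to_dict; infer_instance

-- ===== CLAIM (what is proved, stated in full; the proofs are below) =====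
def Claim_equal_sql_to_dict : Prop := ∀ (query_result : List (List String)) (col_names : List String), Dom_sql_to_dict query_result col_names → Pre_sql_to_dict query_result col_names → Spec_sql_to_dict query_result col_names (sql_to_dict query_result col_names)

-- ===== LEMMAS AND PROOFS =====

-- The initial dict: every value is [].
theorem getD_init (cols : List String) (d : PySem.Dict String (List String)) (k : String)
    (h : d.getD k [] = []) :
    (cols.foldl (fun d col => d.insert col []) d).getD k [] = [] := by
  induction cols generalizing d with
  | nil => exact h
  | cons c cs ih =>
      simp only [List.foldl_cons]
      exact ih _ (by rw [PySem.Dict.getD_insert]; split <;> simp [h])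

-- Fold of inserts: a key not among the inserted keys keeps its value.
theorem getD_foldl_insert_not_mem (l : List (Int × String)) (f : Int → List String)
    (d : PySem.Dict String (List String)) (k : String) (h : k ∉ l.map (·.2)) :
    (l.foldl (fun d p => d.insert p.2 (f p.1)) d).getD k [] = d.getD k [] := by
  induction l generalizing d with
  | nil => rfl
  | cons p l ih =>
      simp only [List.map_cons, List.mem_cons, not_or] at h
      simp only [List.foldl_cons]
      rw [ih _ h.2, PySem.Dict.getD_insert, if_neg h.1]

-- Fold of inserts over snd-distinct pairs: the key (i,k) ends with value f i.
theorem getD_foldl_insert_mem (l : List (Int × String)) (f : Int → List String)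
    (d : PySem.Dict String (List String)) (i : Int) (k : String)
    (hn : (l.map (·.2)).Nodup) (hm : (i, k) ∈ l) :
    (l.foldl (fun d p => d.insert p.2 (f p.1)) d).getD k [] = f i := by
  induction l generalizing d with
  | nil => cases hm
  | cons p l ih =>
      simp only [List.map_cons, List.nodup_cons] at hn
      rcases List.mem_cons.1 hm with h | h
      · subst h
        simp only [List.foldl_cons]
        rw [getD_foldl_insert_not_mem _ _ _ _ hn.1, PySem.Dict.getD_insert_self]
      · have hpk : p.2 ≠ k := by
          intro he; exact hn.1 (he ▸ List.mem_map_of_mem h)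
        simp only [List.foldl_cons]
        exact ih _ hn.2 h

-- Inner fold of modifies: a key not among the modified keys keeps its value.
theorem getD_foldl_modify_not_mem (l : List (Int × String)) (row : List String)
    (d : PySem.Dict String (List String)) (k : String) (h : k ∉ l.map (·.2)) :
    (l.foldl (fun d p => d.modify p.2 [] (fun v => v ++ [PySem.List.pyGetD row p.1 ""])) d).getD k []
      = d.getD k [] := by
  induction l generalizing d with
  | nil => rfl
  | cons p l ih =>
      simp only [List.map_cons, List.mem_cons, not_or] at h
      simp only [List.foldl_cons]
      rw [ih _ h.2, PySem.Dict.getD_modify, if_neg h.1]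

-- Inner fold of modifies over snd-distinct pairs: one row appends row[i] to column k.
theorem getD_foldl_modify_mem (l : List (Int × String)) (row : List String)
    (d : PySem.Dict String (List String)) (i : Int) (k : String)
    (hn : (l.map (·.2)).Nodup) (hm : (i, k) ∈ l) :
    (l.foldl (fun d p => d.modify p.2 [] (fun v => v ++ [PySem.List.pyGetD row p.1 ""])) d).getD k []
      = d.getD k [] ++ [PySem.List.pyGetD row i ""] := by
  induction l generalizing d with
  | nil => cases hm
  | cons p l ih =>
      simp only [List.map_cons, List.nodup_cons] at hn
      rcases List.mem_cons.1 hm with h | h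
      · subst h
        simp only [List.foldl_cons]
        rw [getD_foldl_modify_not_mem _ _ _ _ hn.1, PySem.Dict.getD_modify_self]
      · have hpk : p.2 ≠ k := by
          intro he; exact hn.1 (he ▸ List.mem_map_of_mem h)
        simp only [List.foldl_cons]
        rw [ih _ hn.2 h, PySem.Dict.getD_modify, if_neg (Ne.symm hpk)]

-- Outer fold over the rows: column k collects row[i] from every row, in order.
theorem getD_outer (rows : List (List String)) (l : List (Int × String))
    (d : PySem.Dict String (List String)) (i : Int) (k : String)
    (hn : (l.map (·.2)).Nodup) (hm : (i, k) ∈ l) :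
    (rows.foldl (fun d row =>
        l.foldl (fun d p => d.modify p.2 [] (fun v => v ++ [PySem.List.pyGetD row p.1 ""])) d) d).getD k []
      = d.getD k [] ++ rows.map (fun row => PySem.List.pyGetD row i "") := by
  induction rows generalizing d with
  | nil => simp
  | cons r rs ih =>
      simp only [List.foldl_cons, List.map_cons]
      rw [ih _, getD_foldl_modify_mem _ _ _ _ _ hn hm, List.append_assoc, List.singleton_append]

-- Updating a set of keys with (a sublist of) itself changes nothing.
theorem keys_update_self (K : List String) : PySem.Set.update K K = K := by
  rw [PySem.Set.update_eq_append_filter]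
  have : (PySem.Set.ofList K).filter (fun y => !(PySem.Set.contains K y)) = [] := by
    apply List.filter_eq_nil_iff.2
    intro a ha
    simp only [Bool.not_eq_true', Bool.not_eq_false]
    exact (PySem.Set.contains_iff _ _).2 ((PySem.Set.mem_ofList _ _).1 ha)
  rw [this, List.append_nil]

-- The outer row loop of B never changes the key list (every modify hits an existing key).
theorem keys_outer (rows : List (List String)) (l : List (Int × String))
    (d : PySem.Dict String (List String))
    (h : PySem.Set.update d.keys (l.map (·.2)) = d.keys) :
    (rows.foldl (fun d row =>
        l.foldl (fun d p => d.modify p.2 [] (fun v => v ++ [PySem.List.pyGetD row p.1 ""])) d) d).keys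
      = d.keys := by
  induction rows generalizing d with
  | nil => rfl
  | cons r rs ih =>
      simp only [List.foldl_cons]
      have hk : (l.foldl (fun d p => d.modify p.2 [] (fun v => v ++ [PySem.List.pyGetD r p.1 ""])) d).keys = d.keys := by
        rw [PySem.Dict.keys_foldl_modify_key]; exact h
      rw [ih _ (by rw [hk]; exact h), hk]

-- The two ports agree on every input (outside Pre_ both Pythons raise; the ports share the pyGetD default).
theorem ports_eq (query_result : List (List String)) (col_names : List String) :
    sql_to_dict query_result col_names = sql_to_dict_alt query_result col_names := by
  simp only [sql_to_dict, sql_to_dict_alt]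
  set init : PySem.Dict String (List String) :=
    col_names.foldl (fun d col => d.insert col []) PySem.Dict.empty with hinit
  set E := PySem.List.enumerate init.keys with hE
  have hnod : init.keys.Nodup := by
    rw [hinit, PySem.Dict.keys_foldl_insert]
    simp only [PySem.Dict.keys_empty, PySem.Set.update_nil_left]
    exact PySem.Set.nodup_ofList _
  have hsnd : E.map (·.2) = init.keys := by
    rw [hE]; exact PySem.List.map_snd_enumerate _ _
  have hEnod : (E.map (·.2)).Nodup := by rw [hsnd]; exact hnod
  have hupd : PySem.Set.update init.keys (E.map (·.2)) = init.keys := by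
    rw [hsnd]; exact keys_update_self _
  have hkeysA : (E.foldl (fun d p => d.insert p.2 (colA query_result p.1)) init).keys = init.keys := by
    rw [PySem.Dict.keys_foldl_insert_key]; exact hupd
  have hnodA : (E.foldl (fun d p => d.insert p.2 (colA query_result p.1)) init).keys.Nodup := by
    rw [hkeysA]; exact hnod
  have hkeysB : (query_result.foldl (fun d row =>
      E.foldl (fun d p => d.modify p.2 [] (fun v => v ++ [PySem.List.pyGetD row p.1 ""])) d) init).keys
      = init.keys := keys_outer query_result E init hupd
  have hnodB : (query_result.foldl (fun d row =>
      E.foldl (fun d p => d.modify p.2 [] (fun v => v ++ [PySem.List.pyGetD row p.1 ""])) d) init).keys.Nodup := by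
    rw [hkeysB]; exact hnod
  rw [PySem.Dict.items_eq_map_keys _ hnodA [], PySem.Dict.items_eq_map_keys _ hnodB [],
      hkeysA, hkeysB]
  apply List.map_congr_left
  intro k hk
  obtain ⟨j, hj, hjk⟩ := List.mem_iff_getElem.1 hk
  have hmem : ((0 : Int) + (j : Int), k) ∈ E := by
    rw [hE]
    exact (PySem.List.mem_enumerate_iff _ _ _).2 ⟨j, hj, by rw [hjk]⟩
  rw [getD_foldl_insert_mem _ _ _ _ _ hEnod hmem,
      getD_outer _ _ _ _ _ hEnod hmem,
      getD_init _ _ _ (by rw [PySem.Dict.getD_empty])]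
  simp [colA]

-- ===== VERDICT (by name: the statement is the Claim_ definition above) =====
theorem sql_to_dict_spec : Claim_equal_sql_to_dict := by
  intro query_result col_names _ _
  show sql_to_dict query_result col_names = sql_to_dict_alt query_result col_names
  exact ports_eq query_result col_names
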